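-- pv_equiv track=rewrite | github.com/pepsicolaenj0er/lesson | homework/homework8.py | countPageTurns
-- ===== SOURCE A (Python) =====
-- def countPageTurns(n, m, a):
--     x = 0
--     pageTurns = []
--     for i in a:
--         f = (x+i) // m
--         pageTurns.append(f)
--         x = (x+i) % m
--
--     return pageTurns
-- ===== SOURCE B (Python) =====
-- def countPageTurns(n, m, a):
--     # closed form per index: the k-th count is floor(prefix_{k+1}/m) - floor(prefix_k/m),
--     # computed directly from slice sums (no running accumulator or remainder state)
--     return [sum(a[:k + 1]) // m - sum(a[:k]) // m for k in range(len(a))]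
-- ===== Notes on version B (the rewrite author's own statement) =====
-- stated objective: alternative
-- what changed: B replaces A's stateful remainder-carrying loop by a stateless closed form: each output element is computed independently as floor(sum(a[:k+1])/m) - floor(sum(a[:k])/m) over slice sums, trading O(n) for O(n^2).
import Mathlib
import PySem

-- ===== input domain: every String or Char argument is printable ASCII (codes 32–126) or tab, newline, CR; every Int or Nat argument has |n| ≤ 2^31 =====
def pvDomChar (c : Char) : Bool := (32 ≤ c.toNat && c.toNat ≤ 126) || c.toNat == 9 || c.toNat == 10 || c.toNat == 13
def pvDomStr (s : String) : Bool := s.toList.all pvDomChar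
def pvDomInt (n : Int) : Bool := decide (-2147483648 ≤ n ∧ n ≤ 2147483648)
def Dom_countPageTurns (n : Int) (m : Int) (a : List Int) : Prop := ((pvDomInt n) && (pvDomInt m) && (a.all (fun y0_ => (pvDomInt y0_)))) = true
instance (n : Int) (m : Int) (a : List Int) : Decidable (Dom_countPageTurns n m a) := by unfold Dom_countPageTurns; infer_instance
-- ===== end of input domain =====

-- B computes each count as a stateless closed form over slice sums instead of A's remainder-carrying loop; return values agree wherever Python does not raise (m ≠ 0, or an empty list).


-- ===== PORT A =====
def pvLoopA (m : Int) (x : Int) : List Int → List Int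
  | [] => []
  | i :: rest =>
      PySem.Int.floordiv (x + i) m :: pvLoopA m (PySem.Int.mod (x + i) m) rest

def countPageTurns (n : Int) (m : Int) (a : List Int) : List Int :=
  pvLoopA m 0 a

-- ===== PORT B =====
def countPageTurns_alt (n : Int) (m : Int) (a : List Int) : List Int :=
  (List.range a.length).map (fun k =>
    PySem.Int.floordiv ((a.take (k + 1)).sum) m - PySem.Int.floordiv ((a.take k).sum) m)

-- ===== PRECONDITION & SPEC =====
-- Python raises ZeroDivisionError on m = 0 whenever the loop runs (a nonempty); nothing else is excluded.
def Pre_countPageTurns (n : Int) (m : Int) (a : List Int) : Prop := m ≠ 0 ∨ a = []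
instance (n : Int) (m : Int) (a : List Int) : Decidable (Pre_countPageTurns n m a) := by unfold Pre_countPageTurns; infer_instance
def pvWitness_countPageTurns : Int × Int × List Int := (5, 3, [1, 4, -2, 7])
def Spec_countPageTurns (n : Int) (m : Int) (a : List Int) (out : List Int) : Prop := out = countPageTurns_alt n m a
instance (n : Int) (m : Int) (a : List Int) (out : List Int) : Decidable (Spec_countPageTurns n m a out) := by unfold Spec_countPageTurns; infer_instance

-- ===== CLAIM (what is proved, stated in full; the proofs are below) =====
def Claim_equal_countPageTurns : Prop := ∀ (n : Int) (m : Int) (a : List Int), Dom_countPageTurns n m a → Pre_countPageTurns n m a → Spec_countPageTurns n m a (countPageTurns n m a)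

-- ===== LEMMAS AND PROOFS =====

-- Adding a multiple of m shifts the floor quotient.
theorem pv_fdiv_shift (m s i : Int) (hm : m ≠ 0) :
    PySem.Int.floordiv (PySem.Int.mod s m + i) m
      = PySem.Int.floordiv (s + i) m - PySem.Int.floordiv s m := by
  simp only [PySem.Int.floordiv, PySem.Int.mod]
  have h : s.fmod m + i = s + i + (-(s.fdiv m)) * m := by
    linear_combination Int.fmod_def s m
  rw [h, Int.add_mul_fdiv_right _ _ hm]
  ring

-- The remainder after one step depends only on the running sum mod m.
theorem pv_fmod_shift (m s i : Int) (hm : m ≠ 0) :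
    PySem.Int.mod (PySem.Int.mod s m + i) m = PySem.Int.mod (s + i) m := by
  simp only [PySem.Int.mod]
  have h : s.fmod m + i = s + i + (-(s.fdiv m)) * m := by
    linear_combination Int.fmod_def s m
  rw [h, Int.fmod_def, Int.fmod_def, Int.add_mul_fdiv_right _ _ hm]
  ring

-- Loop invariant: A's loop started from the remainder of s lists the quotient
-- differences of the s-offset prefix sums.
theorem pvLoop_closed (m : Int) (hm : m ≠ 0) :
    ∀ (a : List Int) (s : Int),
      pvLoopA m (PySem.Int.mod s m) a
        = (List.range a.length).map (fun k =>
            PySem.Int.floordiv (s + (a.take (k + 1)).sum) m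
              - PySem.Int.floordiv (s + (a.take k).sum) m) := by
  intro a
  induction a with
  | nil => intro s; rfl
  | cons i rest ih =>
      intro s
      simp only [pvLoopA, List.length_cons, List.range_succ_eq_map, List.map_cons,
        List.map_map, pv_fmod_shift m s i hm, ih (s + i)]
      refine List.cons_eq_cons.mpr ⟨?_, ?_⟩
      · rw [pv_fdiv_shift m s i hm]
        simp
      · apply List.map_congr_left
        intro k _
        simp [List.take_succ_cons, add_assoc]

-- ===== VERDICT (by name: the statement is the Claim_ definition above) =====
theorem countPageTurns_spec : Claim_equal_countPageTurns := by
  intro n m a _ hpre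
  rcases hpre with hm | rfl
  case inr => rfl
  unfold Spec_countPageTurns countPageTurns countPageTurns_alt
  have h := pvLoop_closed m hm a 0
  simpa [PySem.Int.mod, Int.zero_fmod] using h
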